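-- pv_equiv track=rewrite | github.com/sunwupark/Algorithm | 프로그래머스/3/258709. 주사위 고르기/주사위 고르기.py | solution
-- ===== SOURCE A (Python) =====
-- from itertools import combinations, product
--
-- def solution(dice):
--     answer = []
--
--     ## 주사위의 반을 A가 가져가고 반을 B가 가져간다음에 거기서 두개를 뽑았을때 A가 B보다 클 확률을 구하는 것이다
--     ## A가 어떤것을 뽑았을때 더 클까?
--     ## 주사위를 가져갈 수 있는 모든 경우의 수를 for loop로 돌린다음
--     ## 그 구성내에서 A의 모든 조합과 B의 모든 조합을 리스트한다음에
--     ## 그 리스트에서 A가 B보다 큰 개수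
--
--     ## A: [6,7,8,9,10,11,12,13,14]
--     ## B: [10,9,8,7,6,5,4,3,2,1]
--
--     ## 라고할때 6은 1~5까지 크고 7은 1~6나올때까지 크고 하니 사실
--     ## 6이 어떠한 인덱스보다 큰지까지 계산하면 된다 결국은 승률이 높아야하니 전체는 리스트의 크기끼리 곱한값이 될것이고
--     ## A는 asc, B는 desc로 정렬을 하여 A가 더 큰 인덱스를 구한다음 그 크기만큼 빼면 된다
--
--     # 자 그럼 먼저 A와 B를 각자 N/2개씩 고르게 해보자
--     N = len(dice)
--     diceNumList = [i for i in range(1, N+1)]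
--
--     ### total Number list
--     totalNumList = list(combinations(diceNumList, N//2))
--     for AList in totalNumList:
--         ## A가 type을 가진다면 B는 diceNumList - type을 가져야한다
--         realAList = list(AList)
--         realBList = list(set(diceNumList)-set(list(AList)))
--
--         ## 각자 다이스의 결과 리스트를 만든다
--         totalAList = [dice[valA-1] for valA in realAList]
--         totalBList = [dice[valB-1] for valB in realBList]
--
--         arrA = [sum(combination) for combination in product(*totalAList)]
--         arrB = [sum(combination) for combination in product(*totalBList)]
--
--         arrA.sort()
--         arrB.sort()
--
--         lenB = len(arrB)
--         indexB = 0  # B 리스트의 포인터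
--         win_count = 0  # A가 B보다 큰 경우의 수
--
--         for AVal in arrA:
--             # B에서 A보다 작은 원소의 개수를 찾기 위해 indexB를 이동
--             while indexB < lenB and arrB[indexB] < AVal:
--                 indexB += 1
--             win_count += indexB  # indexB 개수만큼 A가 승리한 경우
--
--         answer.append([win_count,AList])
--     answer.sort(key=lambda x: -x[0])
--
--     return list(answer[0][1])
-- ===== SOURCE B (Python) =====
-- from itertools import combinations
--
--
-- def _count_less(sorted_xs, x):
--     # leftmost index whose element is >= x, i.e. how many elements are < x
--     lo, hi = 0, len(sorted_xs)
--     while lo < hi: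
--         mid = (lo + hi) // 2
--         if sorted_xs[mid] < x:
--             lo = mid + 1
--         else:
--             hi = mid
--     return lo
--
--
-- def solution(dice):
--     n = len(dice)
--     best_count = -1
--     best_pick = []
--     for pick in combinations(range(1, n + 1), n // 2):
--         sums_a = [0]
--         sums_b = [0]
--         for i in range(1, n + 1):
--             faces = dice[i - 1]
--             if i in pick:
--                 sums_a = [s + f for s in sums_a for f in faces]
--             else:
--                 sums_b = [s + f for s in sums_b for f in faces]
--         sums_b.sort()
--         wins = sum(_count_less(sums_b, a) for a in sums_a)
--         if wins > best_count:
--             best_count = wins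
--             best_pick = pick
--     return list(best_pick)
-- ===== Notes on version B (the rewrite author's own statement) =====
-- stated objective: alternative
-- what changed: Replaces sort-both-lists-plus-two-pointer win counting with a hand-written binary search over only the sorted B-sums (A-sums stay unsorted), builds the product sums by iterative partial-sum accumulation in one pass over the dice instead of itertools.product per side, and selects the answer with a running strict-greater maximum instead of appending everything and stably sorting by negated count.
import Mathlib
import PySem

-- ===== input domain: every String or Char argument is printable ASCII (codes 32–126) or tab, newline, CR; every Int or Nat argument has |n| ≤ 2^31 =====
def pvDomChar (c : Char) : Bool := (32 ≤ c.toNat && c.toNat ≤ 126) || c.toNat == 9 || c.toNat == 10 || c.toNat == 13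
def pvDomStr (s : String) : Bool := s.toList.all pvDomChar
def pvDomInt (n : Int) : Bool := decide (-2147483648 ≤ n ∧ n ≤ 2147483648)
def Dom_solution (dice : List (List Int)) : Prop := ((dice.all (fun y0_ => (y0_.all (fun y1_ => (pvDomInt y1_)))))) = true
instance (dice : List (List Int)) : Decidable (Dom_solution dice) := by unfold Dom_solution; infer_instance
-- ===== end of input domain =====

-- B replaces A's sort-both-plus-two-pointer win count by a hand-written binary search over only
-- the sorted B-sums, builds product sums by one interleaved partial-sum accumulation pass, and
-- picks the answer with a running strict-greater maximum instead of append-all-then-stable-sort.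

-- ===== PORT A =====

-- itertools.product(*ls) as a list of lists, rightmost factor fastest (exact order)
def prodAll (ls : List (List Int)) : List (List Int) :=
  match ls with
  | [] => [[]]
  | l :: rest => l.flatMap (fun x => (prodAll rest).map (fun t => x :: t))

-- A's inner 'while indexB < lenB and arrB[indexB] < AVal: indexB += 1' (indexB is a nonneg index)
def advance (arrB : List Int) (lenB : Nat) (indexB : Nat) (AVal : Int) : Nat :=
  if h : indexB < lenB ∧ PySem.List.pyGetD arrB (indexB : Int) 0 < AVal then
    advance arrB lenB (indexB + 1) AVal
  else indexB
termination_by lenB - indexB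
decreasing_by omega

def solution (dice : List (List Int)) : List Int :=
  let N := dice.length
  let diceNumList : List Int := PySem.List.pyRange 1 ((N : Int) + 1) 1
  let totalNumList := PySem.List.combinations diceNumList (N / 2)
  let answer : List (Int × List Int) :=
    totalNumList.foldl (fun answer AList =>
      let realAList := AList
      -- list(set(diceNumList) - set(AList)): CPython's set order is immaterial for the returned
      -- value (arrB is sorted below), so the complement is taken in ascending order
      let realBList := diceNumList.filter (fun v => !(AList.contains v))
      let totalAList := realAList.map (fun valA => PySem.List.pyGetD dice (valA - 1) [])
      let totalBList := realBList.map (fun valB => PySem.List.pyGetD dice (valB - 1) [])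
      let arrA := (prodAll totalAList).map (fun c => c.sum)
      let arrB := (prodAll totalBList).map (fun c => c.sum)
      let sortedA := PySem.List.sorted arrA (fun x => x) false
      let sortedB := PySem.List.sorted arrB (fun x => x) false
      let lenB := sortedB.length
      let st := sortedA.foldl (fun (st : Nat × Int) AVal =>
        let indexB := advance sortedB lenB st.1 AVal
        (indexB, st.2 + (indexB : Int))) (0, 0)
      answer ++ [(st.2, AList)]) []
  let answerSorted := PySem.List.sorted answer (fun x => -x.1) false
  (PySem.List.pyGetD answerSorted 0 (0, [])).2

-- ===== PORT B =====

-- B's hand-written bisect-left loop (lo, hi are nonneg; (lo+hi)//2 on nonneg ints is Nat division)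
def countLessLoop (sortedXs : List Int) (x : Int) (lo hi : Nat) : Nat :=
  if h : lo < hi then
    let mid := (lo + hi) / 2
    if PySem.List.pyGetD sortedXs (mid : Int) 0 < x then
      countLessLoop sortedXs x (mid + 1) hi
    else
      countLessLoop sortedXs x lo mid
  else lo
termination_by hi - lo
decreasing_by all_goals omega

def countLess (sortedXs : List Int) (x : Int) : Nat :=
  countLessLoop sortedXs x 0 sortedXs.length

def solution_alt (dice : List (List Int)) : List Int :=
  let n := dice.length
  let best := (PySem.List.combinations (PySem.List.pyRange 1 ((n : Int) + 1) 1) (n / 2)).foldl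
    (fun (best : Int × List Int) pick =>
      let sums := (PySem.List.pyRange 1 ((n : Int) + 1) 1).foldl
        (fun (sums : List Int × List Int) i =>
          let faces := PySem.List.pyGetD dice (i - 1) []
          if pick.contains i then
            (sums.1.flatMap (fun s => faces.map (fun f => s + f)), sums.2)
          else
            (sums.1, sums.2.flatMap (fun s => faces.map (fun f => s + f))))
        ([0], [0])
      let sumsB := PySem.List.sorted sums.2 (fun x => x) false
      let wins : Int := (sums.1.map (fun a => ((countLess sumsB a : Nat) : Int))).sum
      if best.1 < wins then (wins, pick) else best)
    (-1, [])
  best.2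

-- ===== PRECONDITION & SPEC =====
def Spec_solution (dice : List (List Int)) (out : List Int) : Prop := out = solution_alt dice
instance (dice : List (List Int)) (out : List Int) : Decidable (Spec_solution dice out) := by unfold Spec_solution; infer_instance

-- ===== CLAIM (what is proved, stated in full; the proofs are below) =====
def Claim_equal_solution : Prop := ∀ (dice : List (List Int)), Dom_solution dice → Spec_solution dice (solution dice)

-- ===== LEMMAS AND PROOFS =====

-- proof-only abbreviations for the per-split data both programs compute
def faces (dice : List (List Int)) (v : Int) : List Int := PySem.List.pyGetD dice (v - 1) []

def arrOf (dice : List (List Int)) (picked : List Int) : List Int :=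
  (prodAll (picked.map (fun v => faces dice v))).map (fun c => c.sum)

def complOf (dice : List (List Int)) (pick : List Int) : List Int :=
  (PySem.List.pyRange 1 ((dice.length : Int) + 1) 1).filter (fun v => !(pick.contains v))

def wOf (dice : List (List Int)) (pick : List Int) : Int :=
  ((arrOf dice pick).map (fun a =>
    (((PySem.List.sorted (arrOf dice (complOf dice pick)) (fun x => x) false).countP
      (fun b => decide (b < a)) : Nat) : Int))).sum

lemma countP_eq_of_prefix (p : Int → Bool) :
    ∀ (l : List Int) (k : Nat), k ≤ l.length →
      (∀ j (hj : j < l.length), (p l[j] = true ↔ j < k)) → l.countP p = k := by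
  intro l
  induction l with
  | nil =>
    intro k hk _
    simp only [List.length_nil, Nat.le_zero] at hk
    simp [hk]
  | cons a t ih =>
    intro k hk h
    cases k with
    | zero =>
      have ha := h 0 (by simp)
      simp only [List.getElem_cons_zero, Nat.lt_irrefl, iff_false, Bool.not_eq_true] at ha
      have ht : t.countP p = 0 := by
        apply ih 0 (by omega)
        intro j hj
        simpa using (h (j+1) (by simpa using hj))
      simp [List.countP_cons, ht, ha]
    | succ k =>
      have ha : p a = true := by
        have := (h 0 (by simp)).mpr (by omega)
        simpa using this
      have ht : t.countP p = k := by
        apply ih k (by simpa using hk)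
        intro j hj
        simpa [Nat.succ_lt_succ_iff] using h (j+1) (by simpa using hj)
      simp [ha, ht]

lemma sorted_lt_iff (x : Int) :
    ∀ (l : List Int), l.Pairwise (· ≤ ·) →
      ∀ j (hj : j < l.length),
        (l[j] < x ↔ j < l.countP (fun b => decide (b < x))) := by
  intro l
  induction l with
  | nil => intro _ j hj; simp at hj
  | cons a t ih =>
    intro hp j hj
    obtain ⟨hat, hpt⟩ := List.pairwise_cons.mp hp
    by_cases hax : a < x
    · have hc : (a :: t).countP (fun b => decide (b < x)) = t.countP (fun b => decide (b < x)) + 1 := by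
        simp [List.countP_cons, hax]
      cases j with
      | zero => simpa [hc] using hax
      | succ j =>
        have hj' : j < t.length := by simpa using hj
        simp only [List.getElem_cons_succ, hc]
        rw [ih hpt j hj']
        omega
    · have hct : t.countP (fun b => decide (b < x)) = 0 := by
        rw [List.countP_eq_zero]
        intro b hb
        simp only [decide_eq_true_eq]
        exact fun hbx => hax (lt_of_le_of_lt (hat b hb) hbx)
      have hc : (a :: t).countP (fun b => decide (b < x)) = 0 := by
        simp [List.countP_cons, hax, hct]
      rw [hc]
      simp only [Nat.not_lt_zero, iff_false, not_lt]
      cases j with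
      | zero =>
        simp only [List.getElem_cons_zero]
        exact le_of_not_gt hax
      | succ j =>
        have hj' : j < t.length := by simpa using hj
        simp only [List.getElem_cons_succ]
        exact le_trans (le_of_not_gt hax) (hat _ (List.getElem_mem hj'))

lemma getElem_mono_of_pairwise (l : List Int) (hs : l.Pairwise (· ≤ ·)) (i j : Nat)
    (hij : i ≤ j) (hj : j < l.length) : l[i]'(by omega) ≤ l[j] := by
  rcases Nat.lt_or_ge i j with h | h
  · exact List.pairwise_iff_getElem.mp hs i j (by omega) hj h
  · have : i = j := by omega
    subst this; rfl

lemma pyGetD_idx (l : List Int) (i : Nat) (hi : i < l.length) :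
    PySem.List.pyGetD l (i : Int) 0 = l[i] := by
  simp [PySem.List.pyGetD_natCast, List.getD_eq_getElem?_getD, List.getElem?_eq_getElem hi]

lemma advance_eq_aux (arrB : List Int) (x : Int) (hs : arrB.Pairwise (· ≤ ·)) :
    ∀ (m i : Nat), arrB.length - i = m → i ≤ arrB.length →
      (∀ j (hj : j < arrB.length), j < i → arrB[j] < x) →
      advance arrB arrB.length i x = arrB.countP (fun b => decide (b < x)) := by
  intro m
  induction m using Nat.strong_induction_on with
  | _ m ih =>
    intro i hm hi hinv
    rw [advance]
    split
    · next hcond =>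
      obtain ⟨hlt, hvl⟩ := hcond
      rw [pyGetD_idx arrB i hlt] at hvl
      apply ih (arrB.length - (i+1)) (by omega) (i+1) rfl (by omega)
      intro j hj hji
      rcases Nat.lt_or_ge j i with hj' | hj'
      · exact hinv j hj hj'
      · have hje : j = i := by omega
        subst hje; exact hvl
    · next hcond =>
      refine (countP_eq_of_prefix _ arrB i hi ?_).symm
      intro j hj
      constructor
      · intro hpj
        by_contra hji
        push_neg at hji
        rcases Nat.lt_or_ge i arrB.length with hil | hil
        · have hni : ¬ arrB[i] < x := by
            intro hx
            exact hcond ⟨hil, by rw [pyGetD_idx arrB i hil]; exact hx⟩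
          have hmono := getElem_mono_of_pairwise arrB hs i j hji hj
          simp only [decide_eq_true_eq] at hpj
          exact hni (lt_of_le_of_lt hmono hpj)
        · omega
      · intro hji
        simpa using hinv j hj hji

lemma advance_eq (arrB : List Int) (x : Int) (hs : arrB.Pairwise (· ≤ ·)) :
    ∀ (i : Nat), i ≤ arrB.length →
      (∀ j (hj : j < arrB.length), j < i → arrB[j] < x) →
      advance arrB arrB.length i x = arrB.countP (fun b => decide (b < x)) := by
  intro i hi hinv
  exact advance_eq_aux arrB x hs (arrB.length - i) i rfl hi hinv

lemma twoPointer (arrB : List Int) (hsB : arrB.Pairwise (· ≤ ·)) :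
    ∀ (sa : List Int), sa.Pairwise (· ≤ ·) →
      ∀ (i : Nat) (w : Int), i ≤ arrB.length →
        (∀ a ∈ sa, ∀ j (hj : j < arrB.length), j < i → arrB[j] < a) →
        (sa.foldl (fun (st : Nat × Int) a =>
          (advance arrB arrB.length st.1 a,
           st.2 + ((advance arrB arrB.length st.1 a : Nat) : Int))) (i, w)).2
        = w + (sa.map (fun a => ((arrB.countP (fun b => decide (b < a)) : Nat) : Int))).sum := by
  intro sa
  induction sa with
  | nil => intro _ i w _ _; simp
  | cons a t ih =>
    intro hsA i w hi hinv
    obtain ⟨hat, hpt⟩ := List.pairwise_cons.mp hsA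
    have hk : advance arrB arrB.length i a = arrB.countP (fun b => decide (b < a)) :=
      advance_eq arrB a hsB i hi (fun j hj hji => hinv a (by simp) j hj hji)
    simp only [List.foldl_cons, hk]
    rw [ih hpt _ _ List.countP_le_length ?_]
    · simp only [List.map_cons, List.sum_cons]
      ring
    · intro a' ha' j hj hji
      have hja : arrB[j] < a := (sorted_lt_iff a arrB hsB j hj).mpr hji
      exact lt_of_lt_of_le hja (hat a' ha')

lemma countLessLoop_eq (xs : List Int) (x : Int) (hs : xs.Pairwise (· ≤ ·)) :
    ∀ (m lo hi : Nat), hi - lo = m → lo ≤ hi → hi ≤ xs.length →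
      (∀ j (hj : j < xs.length), j < lo → xs[j] < x) →
      (∀ j (hj : j < xs.length), hi ≤ j → ¬ xs[j] < x) →
      countLessLoop xs x lo hi = xs.countP (fun b => decide (b < x)) := by
  intro m
  induction m using Nat.strong_induction_on with
  | _ m ih =>
    intro lo hi hm hlohi hhi hinv1 hinv2
    rw [countLessLoop]
    split
    · next hlt =>
      have hmidlt : (lo + hi) / 2 < xs.length := by omega
      simp only
      rw [pyGetD_idx xs _ hmidlt]
      split
      · next hxm =>
        apply ih (hi - ((lo+hi)/2 + 1)) (by omega) _ _ rfl (by omega) hhi ?_ hinv2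
        intro j hj hjm
        have hle : xs[j] ≤ xs[(lo+hi)/2] := getElem_mono_of_pairwise xs hs j _ (by omega) hmidlt
        exact lt_of_le_of_lt hle hxm
      · next hxm =>
        apply ih ((lo+hi)/2 - lo) (by omega) _ _ rfl (by omega) (by omega) hinv1 ?_
        intro j hj hjm
        intro hcon
        have hle : xs[(lo+hi)/2] ≤ xs[j] := getElem_mono_of_pairwise xs hs _ j hjm hj
        exact hxm (lt_of_le_of_lt hle hcon)
    · next hge =>
      have : lo = hi := by omega
      subst this
      refine (countP_eq_of_prefix _ xs lo (by omega) ?_).symm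
      intro j hj
      constructor
      · intro hpj
        by_contra hji
        push_neg at hji
        exact hinv2 j hj hji (by simpa using hpj)
      · intro hji
        simpa using hinv1 j hj hji

lemma countLess_eq (xs : List Int) (x : Int) (hs : xs.Pairwise (· ≤ ·)) :
    countLess xs x = xs.countP (fun b => decide (b < x)) := by
  unfold countLess
  apply countLessLoop_eq xs x hs xs.length 0 xs.length (by omega) (by omega) (by omega)
  · intro j hj hj0; omega
  · intro j hj hji; omega

lemma foldSums : ∀ (ls : List (List Int)) (acc : List Int),
    ls.foldl (fun sums fc => sums.flatMap (fun s => fc.map (fun f => s + f))) acc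
    = acc.flatMap (fun s => (prodAll ls).map (fun t => s + t.sum)) := by
  intro ls
  induction ls with
  | nil =>
    intro acc
    simp [prodAll]
  | cons l rest ih =>
    intro acc
    rw [List.foldl_cons, ih]
    simp only [prodAll, List.flatMap_map, List.map_flatMap, List.map_map, List.flatMap_assoc]
    congr 1
    funext s
    congr 1
    funext y
    congr 1
    funext t
    simp only [Function.comp_apply, List.sum_cons]
    ring

lemma foldl_pair_split {α β γ : Type} (c : α → Bool) (f : β → α → β) (g : γ → α → γ) :
    ∀ (l : List α) (a : β) (b : γ),
      l.foldl (fun p x => if c x then (f p.1 x, p.2) else (p.1, g p.2 x)) (a, b)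
      = ((l.filter c).foldl f a, (l.filter (fun x => !c x)).foldl g b) := by
  intro l
  induction l with
  | nil => intro a b; rfl
  | cons x t ih =>
    intro a b
    by_cases hc : c x
    · simp [List.foldl_cons, List.filter_cons, hc, ih]
    · simp [List.foldl_cons, List.filter_cons, hc, ih]

lemma filter_mem_of_sublist : ∀ (s l : List Int), s.Sublist l → l.Nodup →
    l.filter (fun v => s.contains v) = s := by
  intro s l hsub
  induction hsub with
  | slnil => simp
  | @cons l₁ l₂ a hsl ih =>
    intro hnd
    rw [List.filter_cons]
    have ha : a ∉ l₂ := (List.nodup_cons.mp hnd).1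
    have has : l₁.contains a = false := by
      simpa using fun hmem => ha (hsl.subset hmem)
    simp only [has, Bool.false_eq_true, reduceIte]
    exact ih (List.nodup_cons.mp hnd).2
  | @cons₂ l₁ l₂ a hsl ih =>
    intro hnd
    rw [List.filter_cons]
    have hat : (a :: l₁).contains a = true := by simp
    simp only [hat, if_pos]
    have hcong : l₂.filter (fun v => (a :: l₁).contains v) = l₂.filter (fun v => l₁.contains v) := by
      apply List.filter_congr
      intro v hv
      have hva : v ≠ a := fun he => (List.nodup_cons.mp hnd).1 (he ▸ hv)
      simp [List.contains_cons, hva]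
    rw [hcong, ih (List.nodup_cons.mp hnd).2]

lemma pyRange_one_eq (n : Nat) :
    PySem.List.pyRange 1 ((n : Int) + 1) 1 = (List.range n).map (fun k : Nat => 1 + (k : Int)) := by
  simp [PySem.List.pyRange]
  split_ifs with h
  · rfl
  · have : n = 0 := by omega
    subst this
    simp

lemma range_nodup (n : Nat) : (PySem.List.pyRange 1 ((n : Int) + 1) 1).Nodup := by
  rw [pyRange_one_eq]
  apply List.Nodup.map ?_ List.nodup_range
  intro a b h
  simp only at h
  omega

lemma range_length (n : Nat) : (PySem.List.pyRange 1 ((n : Int) + 1) 1).length = n := by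
  rw [pyRange_one_eq]; simp

lemma insertBy_ne_nil {α : Type} (before : α → α → Bool) (x : α) (ys : List α) :
    PySem.List.insertBy before x ys ≠ [] := by
  cases ys with
  | nil => simp [PySem.List.insertBy]
  | cons y t =>
    simp only [PySem.List.insertBy]
    split <;> simp

lemma headD_insertBy {α : Type} (before : α → α → Bool) (x : α) (ys : List α) (d : α)
    (h : ys ≠ []) :
    (PySem.List.insertBy before x ys).headD d
      = if before x (ys.headD d) then x else ys.headD d := by
  cases ys with
  | nil => simp at h
  | cons y t =>
    simp only [PySem.List.insertBy, List.headD_cons]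
    split <;> simp_all

lemma headD_foldl_insertBy {α : Type} (before : α → α → Bool) (d : α) :
    ∀ (l : List α) (acc : List α), acc ≠ [] →
      (l.foldl (fun acc x => PySem.List.insertBy before x acc) acc).headD d
      = l.foldl (fun h x => if before x h then x else h) (acc.headD d) := by
  intro l
  induction l with
  | nil => intro acc _; rfl
  | cons x t ih =>
    intro acc hacc
    rw [List.foldl_cons, List.foldl_cons, ih _ (insertBy_ne_nil before x acc),
        headD_insertBy before x acc d hacc]

lemma sel (l : List (List Int)) (f : List Int → Int) (hne : l ≠ [])
    (h0 : ∀ x ∈ l, 0 ≤ f x) :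
    (PySem.List.pyGetD
        (PySem.List.sorted (l.map (fun x => (f x, x))) (fun p => -(p.1)) false)
        0 ((0 : Int), ([] : List Int))).2
    = (l.foldl (fun (best : Int × List Int) x => if best.1 < f x then (f x, x) else best)
        (-1, [])).2 := by
  obtain ⟨x0, t, rfl⟩ : ∃ x0 t, l = x0 :: t := by
    cases l with
    | nil => exact absurd rfl hne
    | cons a b => exact ⟨a, b, rfl⟩
  rw [PySem.List.sorted_eq_foldl_insertBy]
  have hget : ∀ (ys : List (Int × List Int)) (d : Int × List Int),
      PySem.List.pyGetD ys 0 d = ys.headD d := by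
    intro ys d
    cases ys with
    | nil => simp [PySem.List.pyGetD, PySem.List.pyGet?]
    | cons a b => simp [PySem.List.pyGetD_zero_cons]
  rw [hget]
  rw [List.map_cons, List.foldl_cons]
  have h1 : PySem.List.insertBy (fun a b => decide (-a.1 < -b.1)) (f x0, x0) [] = [(f x0, x0)] := by
    simp [PySem.List.insertBy]
  rw [h1, headD_foldl_insertBy _ _ _ _ (by simp), List.headD_cons, List.foldl_map]
  rw [List.foldl_cons]
  have hstep : ((-1 : Int), ([] : List Int)).1 < f x0 := by
    have := h0 x0 (by simp); omega
  rw [if_pos hstep]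
  have hfun : ∀ (h : Int × List Int) (x : List Int),
      (if (fun a b => decide (-a.1 < -b.1)) ((f x, x)) h then (f x, x) else h)
      = (if h.1 < f x then (f x, x) else h) := by
    intro h x
    by_cases hc : h.1 < f x
    · rw [if_pos hc, if_pos]
      simpa using hc
    · rw [if_neg hc, if_neg]
      simpa using hc
  rw [show (fun (h : Int × List Int) (x : List Int) =>
      if (fun a b => decide (-a.1 < -b.1)) ((f x, x)) h then (f x, x) else h)
      = (fun (h : Int × List Int) (x : List Int) => if h.1 < f x then (f x, x) else h) from
    funext fun h => funext fun x => hfun h x]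

lemma wOf_nonneg (dice : List (List Int)) (pick : List Int) : 0 ≤ wOf dice pick := by
  unfold wOf
  apply List.sum_nonneg
  intro x hx
  obtain ⟨a, _, rfl⟩ := List.mem_map.mp hx
  exact Int.natCast_nonneg _

lemma A_pick (dice : List (List Int)) (pick : List Int) :
    ((PySem.List.sorted (arrOf dice pick) (fun x => x) false).foldl
      (fun (st : Nat × Int) AVal =>
        (advance (PySem.List.sorted (arrOf dice (complOf dice pick)) (fun x => x) false)
           (PySem.List.sorted (arrOf dice (complOf dice pick)) (fun x => x) false).length st.1 AVal,
         st.2 + ((advance (PySem.List.sorted (arrOf dice (complOf dice pick)) (fun x => x) false)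
           (PySem.List.sorted (arrOf dice (complOf dice pick)) (fun x => x) false).length st.1 AVal : Nat) : Int)))
      (0, 0)).2 = wOf dice pick := by
  have hsB := PySem.List.sorted_pairwise (arrOf dice (complOf dice pick)) (fun x => x)
  have hsA := PySem.List.sorted_pairwise (arrOf dice pick) (fun x => x)
  rw [twoPointer _ hsB _ hsA 0 0 (by omega) (by intro a _ j hj hji; omega)]
  rw [zero_add]
  unfold wOf
  exact (((PySem.List.sorted_perm (arrOf dice pick) (fun x => x) false)).map _).sum_eq

lemma B_pick (dice : List (List Int)) (pick : List Int)
    (hp : pick ∈ PySem.List.combinations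
        (PySem.List.pyRange 1 ((dice.length : Int) + 1) 1) (dice.length / 2)) :
    ((PySem.List.pyRange 1 ((dice.length : Int) + 1) 1).foldl
        (fun (sums : List Int × List Int) i =>
          if pick.contains i then
            (sums.1.flatMap (fun s => (PySem.List.pyGetD dice (i - 1) []).map (fun f => s + f)), sums.2)
          else
            (sums.1, sums.2.flatMap (fun s => (PySem.List.pyGetD dice (i - 1) []).map (fun f => s + f))))
        ([0], [0]))
    = (arrOf dice pick, arrOf dice (complOf dice pick)) := by
  have hsplit := foldl_pair_split (fun i : Int => pick.contains i)
      (fun (acc : List Int) (i : Int) => acc.flatMap (fun s => (PySem.List.pyGetD dice (i - 1) []).map (fun f => s + f)))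
      (fun (acc : List Int) (i : Int) => acc.flatMap (fun s => (PySem.List.pyGetD dice (i - 1) []).map (fun f => s + f)))
      (PySem.List.pyRange 1 ((dice.length : Int) + 1) 1) [0] [0]
  refine Eq.trans hsplit ?_
  have hsub : pick.Sublist (PySem.List.pyRange 1 ((dice.length : Int) + 1) 1) :=
    ((PySem.List.mem_combinations_iff _ _ _).mp hp).1
  rw [filter_mem_of_sublist pick _ hsub (range_nodup dice.length)]
  have harr : ∀ l : List Int,
      l.foldl (fun acc i => acc.flatMap (fun s => (PySem.List.pyGetD dice (i - 1) []).map (fun f => s + f))) [0]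
      = arrOf dice l := by
    intro l
    calc l.foldl (fun acc i => acc.flatMap (fun s => (PySem.List.pyGetD dice (i - 1) []).map (fun f => s + f))) [0]
        = l.foldl (fun acc v => acc.flatMap (fun s => (faces dice v).map (fun f => s + f))) [0] := by
          simp only [faces]
      _ = (l.map (fun v => faces dice v)).foldl
            (fun sums fc => sums.flatMap (fun s => fc.map (fun f => s + f))) [0] :=
          by rw [List.foldl_map]
      _ = ([(0 : Int)]).flatMap (fun s => (prodAll (l.map (fun v => faces dice v))).map (fun t => s + t.sum)) :=
          foldSums _ _
      _ = arrOf dice l := by simp [arrOf]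
  unfold complOf
  rw [harr pick, harr _]

lemma combinations_ne_nil (dice : List (List Int)) :
    PySem.List.combinations (PySem.List.pyRange 1 ((dice.length : Int) + 1) 1)
      (dice.length / 2) ≠ [] := by
  apply List.ne_nil_of_mem (a := (PySem.List.pyRange 1 ((dice.length : Int) + 1) 1).take (dice.length / 2))
  apply (PySem.List.mem_combinations_iff _ _ _).mpr
  constructor
  · exact List.take_sublist _ _
  · rw [List.length_take, range_length]
    omega

lemma main_eq (dice : List (List Int)) : solution dice = solution_alt dice := by
  have hA : solution dice
      = (PySem.List.pyGetD
          (PySem.List.sorted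
            ((PySem.List.combinations (PySem.List.pyRange 1 ((dice.length : Int) + 1) 1)
              (dice.length / 2)).map (fun p => (wOf dice p, p)))
            (fun x => -(x.1)) false) 0 ((0 : Int), ([] : List Int))).2 := by
    simp only [solution]
    rw [PySem.List.foldl_append_singleton_eq_map]
    simp only [List.nil_append]
    refine congrArg (fun l => (PySem.List.pyGetD
      (PySem.List.sorted l (fun x : Int × List Int => -(x.1)) false) 0 ((0 : Int), ([] : List Int))).2) ?_
    apply List.map_congr_left
    intro p hp
    exact Prod.ext (A_pick dice p) rfl
  have hB : solution_alt dice
      = ((PySem.List.combinations (PySem.List.pyRange 1 ((dice.length : Int) + 1) 1)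
          (dice.length / 2)).foldl
          (fun (best : Int × List Int) p => if best.1 < wOf dice p then (wOf dice p, p) else best)
          (-1, [])).2 := by
    simp only [solution_alt]
    refine congrArg (fun z : Int × List Int => z.2) ?_
    apply PySem.List.foldl_congr_mem
    intro best pick hpk
    rw [B_pick dice pick hpk]
    dsimp only
    have hw : ((arrOf dice pick).map (fun a =>
        ((countLess (PySem.List.sorted (arrOf dice (complOf dice pick)) (fun x => x) false) a : Nat) : Int))).sum
        = wOf dice pick := by
      unfold wOf
      congr 1
      apply List.map_congr_left
      intro a _
      rw [countLess_eq _ _ (PySem.List.sorted_pairwise _ _)]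
    rw [hw]
  rw [hA, hB]
  exact sel _ (wOf dice) (combinations_ne_nil dice) (fun p _ => wOf_nonneg dice p)

-- ===== VERDICT (by name: the statement is the Claim_ definition above) =====
theorem solution_spec : Claim_equal_solution := by
  intro dice _
  unfold Spec_solution
  exact main_eq dice
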